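-- pv_equiv track=rewrite | github.com/morgoth1145/advent-of-code | 2020/Day 13/solution.py | find_bus_cadence
-- ===== SOURCE A (Python) =====
-- def find_bus_cadence(a, b, start, offset):
--     n = start
--     while (n-offset) % a != 0:
--         n += b
--     m = n+b
--     while (m-offset) % a != 0:
--         m += b
--     return n, m-n
-- ===== SOURCE B (Python) =====
-- def _egcd(x, y):
--     # extended Euclid: returns (g, u, v) with u*x + v*y == g == gcd(x, y), for x, y >= 0
--     if y == 0:
--         return x, 1, 0
--     g, u, v = _egcd(y, x % y)
--     return g, v, u - (x // y) * v
--
--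
-- def find_bus_cadence(a, b, start, offset):
--     A = abs(a)
--     g, _, v = _egcd(A, b % A)
--     step = A // g
--     t = (v * ((offset - start) // g)) % step
--     return start + t * b, step * b
-- ===== Notes on version B (the rewrite author's own statement) =====
-- stated objective: faster
-- what changed: Replaces both linear scans (step b until the residue matches, twice) by solving the linear congruence t*b = offset-start (mod |a|) with an extended-Euclid modular inverse, and returns the cadence as (|a|/gcd)*b in closed form.
import Mathlib
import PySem

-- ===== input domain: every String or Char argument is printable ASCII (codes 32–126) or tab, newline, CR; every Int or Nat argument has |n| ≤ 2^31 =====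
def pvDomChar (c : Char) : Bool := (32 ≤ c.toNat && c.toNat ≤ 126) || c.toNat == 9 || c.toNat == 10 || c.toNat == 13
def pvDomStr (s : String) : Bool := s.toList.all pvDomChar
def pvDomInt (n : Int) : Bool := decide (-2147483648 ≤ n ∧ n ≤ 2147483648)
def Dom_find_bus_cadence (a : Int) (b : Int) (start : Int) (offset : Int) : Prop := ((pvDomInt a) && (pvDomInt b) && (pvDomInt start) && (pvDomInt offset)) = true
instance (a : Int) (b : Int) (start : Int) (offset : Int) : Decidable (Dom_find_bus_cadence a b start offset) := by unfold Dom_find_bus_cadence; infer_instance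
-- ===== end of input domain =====

-- B replaces A's two linear scans by an extended-Euclid modular-inverse solution of the
-- linear congruence and a closed-form cadence (|a|/gcd)*b.


-- ===== PORT A =====
-- 'while (n-offset) % a != 0: n += b', with a fuel bound (a guard making the same
-- computation total; under Pre_ the loop stops strictly before the fuel runs out)
def fbcLoop (a : Int) (b : Int) (offset : Int) : Nat → Int → Int
  | 0, n => n
  | fuel + 1, n =>
    if PySem.Int.mod (n - offset) a ≠ 0 then fbcLoop a b offset fuel (n + b) else n

def find_bus_cadence (a : Int) (b : Int) (start : Int) (offset : Int) : Int × Int :=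
  let n := fbcLoop a b offset (a.natAbs + 1) start
  let m := fbcLoop a b offset (a.natAbs + 1) (n + b)
  (n, m - n)

-- ===== PORT B =====
-- termination helper for egcd (cited in decreasing_by)
lemma pvModNatAbsLt (x y : Int) (hy : y ≠ 0) : (PySem.Int.mod x y).natAbs < y.natAbs := by
  rcases lt_or_gt_of_ne hy with h | h
  · have h1 := PySem.Int.mod_neg_bounds x (b := y) h
    omega
  · have h1 := PySem.Int.mod_nonneg x (b := y) h
    have h2 := PySem.Int.mod_lt x (b := y) h
    omega

-- extended Euclid, _egcd from Source B
def egcd (x : Int) (y : Int) : Int × Int × Int :=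
  if h : y = 0 then (x, 1, 0)
  else
    let r := egcd y (PySem.Int.mod x y)
    (r.1, r.2.2, r.2.1 - PySem.Int.floordiv x y * r.2.2)
termination_by y.natAbs
decreasing_by exact pvModNatAbsLt x y h

def find_bus_cadence_alt (a : Int) (b : Int) (start : Int) (offset : Int) : Int × Int :=
  let A : Int := a.natAbs
  let e := egcd A (PySem.Int.mod b A)
  let g := e.1
  let v := e.2.2
  let step := PySem.Int.floordiv A g
  let t := PySem.Int.mod (v * PySem.Int.floordiv (offset - start) g) step
  (start + t * b, step * b)

-- ===== PRECONDITION & SPEC =====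
-- Pre_ = exactly the inputs on which A returns: a = 0 raises ZeroDivisionError, and A's two
-- scans terminate iff gcd(a,b) divides offset-start (otherwise A loops forever).
def Pre_find_bus_cadence (a : Int) (b : Int) (start : Int) (offset : Int) : Prop :=
  a ≠ 0 ∧ (Int.gcd a b : Int) ∣ (offset - start)
instance (a : Int) (b : Int) (start : Int) (offset : Int) : Decidable (Pre_find_bus_cadence a b start offset) := by unfold Pre_find_bus_cadence; infer_instance

def pvWitness_find_bus_cadence : Int × Int × Int × Int := (2, 3, 5, 6)

def Spec_find_bus_cadence (a : Int) (b : Int) (start : Int) (offset : Int) (out : Int × Int) : Prop := out = find_bus_cadence_alt a b start offset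
instance (a : Int) (b : Int) (start : Int) (offset : Int) (out : Int × Int) : Decidable (Spec_find_bus_cadence a b start offset out) := by unfold Spec_find_bus_cadence; infer_instance

-- ===== CLAIM (what is proved, stated in full; the proofs are below) =====
def Claim_equal_find_bus_cadence : Prop := ∀ (a : Int) (b : Int) (start : Int) (offset : Int), Dom_find_bus_cadence a b start offset → Pre_find_bus_cadence a b start offset → Spec_find_bus_cadence a b start offset (find_bus_cadence a b start offset)

-- ===== LEMMAS AND PROOFS =====

-- the loop stops at the FIRST t with a ∣ (n - offset + t*b)
lemma fbcLoop_hit (a b offset : Int) :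
    ∀ (fuel t : Nat) (n : Int), t < fuel →
      a ∣ (n - offset + (t : Int) * b) →
      (∀ s : Nat, s < t → ¬ a ∣ (n - offset + (s : Int) * b)) →
      fbcLoop a b offset fuel n = n + (t : Int) * b := by
  intro fuel
  induction fuel with
  | zero => intro t n h; omega
  | succ f ih =>
    intro t n hlt hdvd hmin
    cases t with
    | zero =>
      simp only [Nat.cast_zero, zero_mul, add_zero] at hdvd ⊢
      have : PySem.Int.mod (n - offset) a = 0 := by
        rw [PySem.Int.mod_eq_zero_iff_dvd]; simpa using hdvd
      simp [fbcLoop, this]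
    | succ t' =>
      have h0 : ¬ a ∣ (n - offset + (0 : Int) * b) := hmin 0 (Nat.succ_pos t')
      have hc : PySem.Int.mod (n - offset) a ≠ 0 := by
        intro h
        rw [PySem.Int.mod_eq_zero_iff_dvd] at h
        exact h0 (by simpa using h)
      have hrec := ih t' (n + b) (by omega)
        (by push_cast at hdvd ⊢; have : n + b - offset + (t' : Int) * b = n - offset + ((t' : Int) + 1) * b := by ring
            rw [this]; exact hdvd)
        (by intro s hs
            have := hmin (s + 1) (by omega)
            push_cast at this ⊢
            intro hd; apply this
            have : n - offset + ((s : Int) + 1) * b = n + b - offset + (s : Int) * b := by ring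
            rw [this]; exact hd)
      simp only [fbcLoop, if_pos hc]
      rw [hrec]; push_cast; ring

lemma egcd_bezout : ∀ (x y : Int),
    (egcd x y).2.1 * x + (egcd x y).2.2 * y = (egcd x y).1 := by
  intro x y
  induction x, y using egcd.induct with
  | case1 x => rw [egcd]; simp
  | case2 x y h ih =>
    rw [egcd]
    simp only [dif_neg h]
    have hm := PySem.Int.floordiv_mul_add_mod x y
    set q := PySem.Int.floordiv x y
    set m := PySem.Int.mod x y
    rw [show x = q * y + m by omega]
    ring_nf
    ring_nf at ih
    linarith [ih]

lemma egcd_gcd : ∀ (x y : Int), 0 ≤ x → 0 ≤ y → (egcd x y).1 = Int.gcd x y := by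
  intro x y
  induction x, y using egcd.induct with
  | case1 x =>
    intro hx _
    rw [egcd]
    simp only [Int.gcd_zero_right]
    exact (Int.natAbs_of_nonneg hx).symm
  | case2 x y h ih =>
    intro hx hy
    have hy' : 0 < y := lt_of_le_of_ne hy (Ne.symm h)
    have hme : PySem.Int.mod x y = x % y := PySem.Int.mod_eq_emod_of_pos hy'
    rw [egcd]
    simp only [dif_neg h]
    have hrec := ih hy (by rw [hme]; exact Int.emod_nonneg x (by omega))
    rw [hrec, hme]
    rw [Int.emod_def]
    have he : x - y * (x / y) = x - x / y * y := by ring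
    rw [he, Int.gcd_sub_mul_right_right]
    rw [Int.gcd_comm]

-- the heart: under Pre_, both ports return (start + t*b, (|a|/g)*b) for the least solution t
lemma fbc_main (a b start offset : Int) (ha : a ≠ 0)
    (hdv : (Int.gcd a b : Int) ∣ (offset - start)) :
    find_bus_cadence a b start offset = find_bus_cadence_alt a b start offset := by
  simp only [find_bus_cadence, find_bus_cadence_alt]
  set A : Int := (a.natAbs : Int) with hAdef
  have hApos : 0 < A := by simp [hAdef]; omega
  set mb : Int := PySem.Int.mod b A with hmbdef
  have hmb0 : 0 ≤ mb := PySem.Int.mod_nonneg b hApos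
  have hmbA : mb < A := PySem.Int.mod_lt b hApos
  set e := egcd A mb with hedef
  set g := e.1 with hgdef
  set u := e.2.1 with hudef
  set v := e.2.2 with hvdef
  have hbez : u * A + v * mb = g := egcd_bezout A mb
  have hggcd : g = Int.gcd A mb := egcd_gcd A mb (le_of_lt hApos) hmb0
  set kb := PySem.Int.floordiv b A with hkbdef
  have hkb : kb * A + mb = b := PySem.Int.floordiv_mul_add_mod b A
  have hgab : Int.gcd A mb = Int.gcd a b := by
    have h1 : Int.gcd A (mb + kb * A) = Int.gcd A mb := Int.gcd_add_mul_right_right A mb kb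
    have h2 : mb + kb * A = b := by linarith
    rw [h2] at h1
    rw [← h1]
    simp [hAdef, Int.gcd, Int.natAbs_abs]
  have hgpos : 0 < g := by
    rw [hggcd]
    have : Int.gcd A mb ≠ 0 := by
      simp only [ne_eq, Int.gcd_eq_zero_iff, not_and_or]
      left; omega
    omega
  have hgA : g ∣ A := hggcd ▸ Int.gcd_dvd_left A mb
  have hgmb : g ∣ mb := hggcd ▸ Int.gcd_dvd_right A mb
  obtain ⟨sA, hsA⟩ := hgA
  obtain ⟨smb, hsmb⟩ := hgmb
  have hsApos : 0 < sA := by nlinarith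
  have hstep : PySem.Int.floordiv A g = sA := by
    rw [PySem.Int.floordiv_eq_ediv_of_pos hgpos, hsA, Int.mul_ediv_cancel_left sA hgpos.ne']
  have hq' : g ∣ (offset - start) := by rw [hggcd, hgab]; exact hdv
  obtain ⟨q, hq⟩ := hq'
  have hqdiv : PySem.Int.floordiv (offset - start) g = q := by
    rw [PySem.Int.floordiv_eq_ediv_of_pos hgpos, hq, Int.mul_ediv_cancel_left q hgpos.ne']
  rw [hqdiv, hstep]
  set t := PySem.Int.mod (v * q) sA with htdef
  have ht0 : 0 ≤ t := PySem.Int.mod_nonneg _ hsApos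
  have htlt : t < sA := PySem.Int.mod_lt _ hsApos
  set kt := PySem.Int.floordiv (v * q) sA with hktdef
  have hkt : kt * sA + t = v * q := PySem.Int.floordiv_mul_add_mod _ sA
  have ht' : t = v * q - kt * sA := by linarith
  have hb : b = g * (sA * kb + smb) := by linear_combination (-1 : Int) * hkb + kb * hsA + hsmb
  have hR4 : u * sA + v * smb = 1 := by
    have h1 : g * (u * sA + v * smb) = g * 1 := by linear_combination hbez - u * hsA - v * hsmb
    exact mul_left_cancel₀ hgpos.ne' h1
  have hsAA : sA ≤ A := by nlinarith
  have hsol : A ∣ (start - offset + t * b) := by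
    refine ⟨v * q * kb - u * q - kt * sA * kb - kt * smb, ?_⟩
    rw [ht', hb, hsA]
    linear_combination (g * q) * hR4 - hq
  have huniq : ∀ x y : Int, A ∣ (start - offset + x * b) → A ∣ (start - offset + y * b) →
      sA ∣ (x - y) := by
    intro x y h1 h2
    have hd : A ∣ (x - y) * b := by
      have h3 := dvd_sub h1 h2
      have h4 : (start - offset + x * b) - (start - offset + y * b) = (x - y) * b := by ring
      rwa [h4] at h3
    rw [hsA, hb] at hd
    have hd' : g * sA ∣ g * ((x - y) * (sA * kb + smb)) := by
      have h5 : (x - y) * (g * (sA * kb + smb)) = g * ((x - y) * (sA * kb + smb)) := by ring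
      rwa [h5] at hd
    have hd2 : sA ∣ (x - y) * (sA * kb + smb) := (mul_dvd_mul_iff_left hgpos.ne').mp hd'
    have hcop : IsCoprime sA (sA * kb + smb) := ⟨u - v * kb, v, by linear_combination hR4⟩
    exact hcop.dvd_of_dvd_mul_right hd2
  have hadvd : ∀ x : Int, (a ∣ x) ↔ (A ∣ x) := by
    intro x; rw [hAdef, Int.natAbs_dvd]
  have hloop1 : fbcLoop a b offset (a.natAbs + 1) start = start + t * b := by
    have h1 := fbcLoop_hit a b offset (a.natAbs + 1) t.toNat start
      (by omega)
      (by rw [hadvd]; rw [Int.toNat_of_nonneg ht0]; exact hsol)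
      (by intro s hs
          rw [hadvd]
          intro hds
          have h2 := huniq t s hsol hds
          have h3 := Int.le_of_dvd (by omega) h2
          omega)
    rw [Int.toNat_of_nonneg ht0] at h1
    exact h1
  have hsolsA : A ∣ sA * b := ⟨sA * kb + smb, by rw [hb, hsA]; ring⟩
  have hloop2 : fbcLoop a b offset (a.natAbs + 1) (start + t * b + b)
      = start + t * b + b + (sA - 1) * b := by
    have h1 := fbcLoop_hit a b offset (a.natAbs + 1) (sA - 1).toNat (start + t * b + b)
      (by omega)
      (by rw [hadvd, Int.toNat_of_nonneg (by omega : (0:Int) ≤ sA - 1)]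
          have h2 : start + t * b + b - offset + (sA - 1) * b
              = (start - offset + t * b) + sA * b := by ring
          rw [h2]
          exact dvd_add hsol hsolsA)
      (by intro s hs
          rw [hadvd]
          intro hds
          have h2 : start + t * b + b - offset + (s : Int) * b
              = start - offset + (t + 1 + s) * b := by ring
          rw [h2] at hds
          have h3 := huniq (t + 1 + s) t hds hsol
          have h4 : t + 1 + s - t = 1 + s := by ring
          rw [h4] at h3
          have h5 := Int.le_of_dvd (by omega) h3
          omega)
    rw [Int.toNat_of_nonneg (by omega : (0:Int) ≤ sA - 1)] at h1
    exact h1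
  rw [hloop1, hloop2]
  simp only [Prod.mk.injEq]
  exact ⟨trivial, by ring⟩

-- ===== VERDICT (by name: the statement is the Claim_ definition above) =====
theorem find_bus_cadence_spec : Claim_equal_find_bus_cadence := by
  intro a b start offset _ hpre
  unfold Spec_find_bus_cadence
  exact fbc_main a b start offset hpre.1 hpre.2
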